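-- pv_equiv track=rewrite | github.com/zkytony/relations-pomdp | relpomdp/home2d/learning/compute_difficulty.py | process_detections_random
-- ===== SOURCE A (Python) =====
-- def process_detections_random(detections):
--     """Detections is created by running a random explorer"""
--     # For each class of object, find the step number that it is
--     # first detected in the trial.
--     class_detections = {}  # maps from class name to a list of steps that marks its detection
--     for envid in detections:
--         done_classes = set()
--         for step in range(len(detections[envid])):
--             d = detections[envid][step]
--             _, detected_ids, detected_poses = d
--             for detected_class in detected_poses:
--                 if detected_class in done_classes:
--                     continue
--                 if detected_class not in class_detections:
--                     class_detections[detected_class] = []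
--                 class_detections[detected_class].append(step)
--                 done_classes.add(detected_class)
--     return class_detections
-- ===== SOURCE B (Python) =====
-- def process_detections_random(detections):
--     """Detections is created by running a random explorer"""
--     env_steps = [detections[envid] for envid in detections]
--     # phase 1: global class order = the order each class is first ever detected
--     classes = []
--     for steps in env_steps:
--         for _, _ids, poses in steps:
--             for cls in poses:
--                 if cls not in classes:
--                     classes.append(cls)
--     # phase 2: recompute, per class, the earliest detection step in each env that detects it
--     return {
--         cls: [min(step for step, (_, _i, poses) in enumerate(steps) if cls in poses)
--               for steps in env_steps
--               if any(cls in poses for _, _i, poses in steps)]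
--         for cls in classes
--     }
-- ===== Notes on version B (the rewrite author's own statement) =====
-- stated objective: alternative
-- what changed: Replaces A's single streaming pass (seen-set guard, append-on-first-hit mutation) by a brute-force group-by: first collect the global class order, then rebuild each class's value independently with a comprehension taking min(step) over each env that detects it.
import Mathlib
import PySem

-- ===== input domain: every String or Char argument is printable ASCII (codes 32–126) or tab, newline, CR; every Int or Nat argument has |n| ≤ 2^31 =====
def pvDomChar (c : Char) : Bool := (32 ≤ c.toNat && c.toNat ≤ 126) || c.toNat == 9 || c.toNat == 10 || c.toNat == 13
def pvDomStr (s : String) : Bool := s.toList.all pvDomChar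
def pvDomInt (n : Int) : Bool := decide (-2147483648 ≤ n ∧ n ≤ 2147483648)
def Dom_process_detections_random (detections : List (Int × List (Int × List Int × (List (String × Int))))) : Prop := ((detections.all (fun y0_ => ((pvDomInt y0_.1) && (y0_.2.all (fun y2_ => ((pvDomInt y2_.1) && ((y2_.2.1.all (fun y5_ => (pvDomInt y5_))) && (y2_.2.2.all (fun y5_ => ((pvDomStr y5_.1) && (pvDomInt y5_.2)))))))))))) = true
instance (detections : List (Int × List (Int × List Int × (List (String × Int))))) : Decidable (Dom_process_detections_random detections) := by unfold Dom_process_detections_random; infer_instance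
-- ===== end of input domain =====

-- B replaces A's single streaming pass (seen-set guard, append-on-first-hit) by a brute-force
-- group-by: collect the global class order, then rebuild each class's per-env first step with min.


-- ===== PORT A =====
-- dict iteration 'for envid in detections: detections[envid]' is ported as iteration over the
-- (envid, value) pairs (dicts have unique keys); 'for step in range(len(xs)): d = xs[step]' is
-- ported as fold over PySem.List.enumerate xs (the same (step, d) values).
def process_detections_random (detections : List (Int × List (Int × List Int × (List (String × Int))))) : List (String × List Int) :=
  (detections.foldl
    (fun (cd : PySem.Dict String (List Int)) env =>
      ((PySem.List.enumerate env.2).foldl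
        (fun (st : PySem.Dict String (List Int) × PySem.Set String) p =>
          p.2.2.2.foldl
            (fun (st : PySem.Dict String (List Int) × PySem.Set String) q =>
              if PySem.Set.contains st.2 q.1 then st
              else (st.1.insert q.1 (st.1.getD q.1 [] ++ [p.1]), PySem.Set.add st.2 q.1))
            st)
        (cd, PySem.Set.empty)).1)
    PySem.Dict.empty).items

-- ===== PORT B =====
-- 'cls not in classes' is list membership (List.contains); the dict comprehension's keys
-- (classes) are distinct, so it is ported as a map producing the items in key order;
-- 'min(generator)' is PySem.List.min? over the list of matching steps — the '.getD 0' arm is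
-- unreachable because the comprehension's 'if any(...)' guard makes that list nonempty.
def process_detections_random_alt (detections : List (Int × List (Int × List Int × (List (String × Int))))) : List (String × List Int) :=
  let envSteps := detections.map (fun e => e.2)
  let classes := envSteps.foldl
    (fun (cs : List String) steps =>
      steps.foldl (fun cs d =>
        d.2.2.foldl (fun (cs : List String) q =>
          if cs.contains q.1 then cs else cs ++ [q.1]) cs) cs) []
  classes.map (fun cls =>
    (cls,
      (envSteps.filter (fun steps =>
          steps.any (fun d => d.2.2.any (fun q => q.1 == cls)))).map
        (fun steps =>
          ((PySem.List.min?
            ((PySem.List.enumerate steps).filterMap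
              (fun p => if p.2.2.2.any (fun q => q.1 == cls) then some p.1 else none))
            (fun x => x)).getD 0))))

-- ===== PRECONDITION & SPEC =====
def Spec_process_detections_random (detections : List (Int × List (Int × List Int × (List (String × Int))))) (out : List (String × List Int)) : Prop := out = process_detections_random_alt detections
instance (detections : List (Int × List (Int × List Int × (List (String × Int))))) (out : List (String × List Int)) : Decidable (Spec_process_detections_random detections out) := by unfold Spec_process_detections_random; infer_instance

-- ===== CLAIM (what is proved, stated in full; the proofs are below) =====
def Claim_equal_process_detections_random : Prop := ∀ (detections : List (Int × List (Int × List Int × (List (String × Int))))), Dom_process_detections_random detections → Spec_process_detections_random detections (process_detections_random detections)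

-- ===== LEMMAS AND PROOFS =====

-- A's atomic step on one (class, step) occurrence
def pvStepA (st : PySem.Dict String (List Int) × PySem.Set String) (o : String × Int) :
    PySem.Dict String (List Int) × PySem.Set String :=
  if PySem.Set.contains st.2 o.1 then st
  else (st.1.insert o.1 (st.1.getD o.1 [] ++ [o.2]), PySem.Set.add st.2 o.1)

-- keep-first atomic step (the per-env "firsts" dict A effectively builds)
def pvStepB (f : PySem.Dict String Int) (o : String × Int) : PySem.Dict String Int :=
  if f.contains o.1 then f else f.insert o.1 o.2

-- emit atomic step
def pvStepE (cd : PySem.Dict String (List Int)) (pr : String × Int) : PySem.Dict String (List Int) :=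
  cd.insert pr.1 (cd.getD pr.1 [] ++ [pr.2])

-- the per-env stream of (class, step) occurrences, in traversal order
def pvOcc (steps : List (Int × List Int × (List (String × Int)))) : List (String × Int) :=
  (PySem.List.enumerate steps).flatMap (fun p => p.2.2.2.map (fun q => (q.1, p.1)))

def pvFirsts (steps : List (Int × List Int × (List (String × Int)))) : PySem.Dict String Int :=
  (pvOcc steps).foldl pvStepB PySem.Dict.empty

-- first step (as a value) at which class c is detected in an env
def pvFirstVal (c : String) (steps : List (Int × List Int × (List (String × Int)))) : Int :=
  ((((pvOcc steps).find? (fun o => o.1 == c)).map (fun o => o.2)).getD 0)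

def pvHas (c : String) (steps : List (Int × List Int × (List (String × Int)))) : Bool :=
  steps.any (fun d => d.2.2.any (fun q => q.1 == c))

-- the nested enumerate/poses fold is the fold over the flattened occurrence stream
theorem pvFlatten {σ : Type} (g : σ → String × Int → σ) :
    ∀ (E : List (Int × (Int × List Int × (List (String × Int))))) (st : σ),
      E.foldl (fun st p => p.2.2.2.foldl (fun st q => g st (q.1, p.1)) st) st
        = (E.flatMap (fun p => p.2.2.2.map (fun q => (q.1, p.1)))).foldl g st := by
  intro E
  induction E with
  | nil => intro st; rfl
  | cons p E ih =>
      intro st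
      simp [List.flatMap_cons, List.foldl_append, List.foldl_map, ih]

-- core invariant: running A's guarded step from (cd, done) equals emitting, onto cd, exactly
-- the items the keep-first dict adds to f — provided done and f agree as membership tests.
theorem pvCore :
    ∀ (L : List (String × Int)) (cd : PySem.Dict String (List Int))
      (done : PySem.Set String) (f : PySem.Dict String Int),
      (∀ c, PySem.Set.contains done c = f.contains c) →
      ∃ Δ, (L.foldl pvStepB f).items = f.items ++ Δ ∧
           (L.foldl pvStepA (cd, done)).1 = Δ.foldl pvStepE cd := by
  intro L
  induction L with
  | nil => intro cd done f _; exact ⟨[], by simp, rfl⟩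
  | cons o L ih =>
      intro cd done f h
      by_cases hc : f.contains o.1 = true
      · have hdone : o.1 ∈ done := by
          have := (h o.1).trans hc; simpa using this
        have hA : pvStepA (cd, done) o = (cd, done) := by
          simp [pvStepA, hdone]
        have hB : pvStepB f o = f := by simp [pvStepB, hc]
        simpa [List.foldl_cons, hA, hB] using ih cd done f h
      · have hc' : f.contains o.1 = false := by simpa using hc
        have hdone : o.1 ∉ done := by
          have := (h o.1).trans hc'; simpa using this
        have hA : pvStepA (cd, done) o
            = (cd.insert o.1 (cd.getD o.1 [] ++ [o.2]), PySem.Set.add done o.1) := by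
          simp [pvStepA, hdone]
        have hB : pvStepB f o = f.insert o.1 o.2 := by simp [pvStepB, hc']
        have hrel : ∀ c, PySem.Set.contains (PySem.Set.add done o.1) c
            = (f.insert o.1 o.2).contains c := by
          intro c
          have h' := h c
          simp at h'
          by_cases hco : c = o.1
          · subst hco
            simp [PySem.Set.mem_add]
          · simp [PySem.Set.mem_add, PySem.Dict.contains_insert, hco, h',
              show (c == o.1) = false by simpa using hco]
        obtain ⟨Δ, h1, h2⟩ := ih (cd.insert o.1 (cd.getD o.1 [] ++ [o.2]))
          (PySem.Set.add done o.1) (f.insert o.1 o.2) hrel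
        refine ⟨(o.1, o.2) :: Δ, ?_, ?_⟩
        · rw [List.foldl_cons, hB, h1]
          simp [PySem.Dict.items_insert, hc']
        · rw [List.foldl_cons, hA, h2]; rfl

-- per-env agreement: A's inner double loop from (cd, ∅) equals emitting (pvFirsts e).items onto cd
theorem pvEnv (cd : PySem.Dict String (List Int))
    (steps : List (Int × List Int × (List (String × Int)))) :
    ((PySem.List.enumerate steps).foldl
        (fun (st : PySem.Dict String (List Int) × PySem.Set String) p =>
          p.2.2.2.foldl
            (fun (st : PySem.Dict String (List Int) × PySem.Set String) q =>
              if PySem.Set.contains st.2 q.1 then st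
              else (st.1.insert q.1 (st.1.getD q.1 [] ++ [p.1]), PySem.Set.add st.2 q.1))
            st)
        (cd, PySem.Set.empty)).1
    = (pvFirsts steps).items.foldl pvStepE cd := by
  have hA := pvFlatten pvStepA (PySem.List.enumerate steps) (cd, PySem.Set.empty)
  have hrel : ∀ c, PySem.Set.contains PySem.Set.empty c
      = (PySem.Dict.empty (κ := String) (ν := Int)).contains c := by
    intro c; simp [PySem.Set.empty, PySem.Set.contains, PySem.Dict.contains_empty]
  obtain ⟨Δ, h1, h2⟩ := pvCore (pvOcc steps) cd PySem.Set.empty PySem.Dict.empty hrel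
  have hΔ : Δ = (pvFirsts steps).items := by
    rw [pvFirsts, h1]; simp [PySem.Dict.empty]
  calc
    _ = ((pvOcc steps).foldl pvStepA (cd, PySem.Set.empty)).1 := by
          rw [pvOcc, ← hA]; rfl
    _ = Δ.foldl pvStepE cd := h2
    _ = _ := by rw [hΔ]

-- ---- characterization of pvFirsts (the keep-first fold) ----
theorem pvKeysB : ∀ (L : List (String × Int)) (f : PySem.Dict String Int),
    (L.foldl pvStepB f).keys = PySem.Set.update f.keys (L.map (fun o => o.1)) := by
  intro L
  induction L with
  | nil => intro f; rfl
  | cons o L ih =>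
      intro f
      by_cases hc : f.contains o.1 = true
      · have hmem : o.1 ∈ f.keys := (PySem.Dict.contains_iff_mem_keys f o.1).mp hc
        have hadd : PySem.Set.add f.keys o.1 = f.keys := by
          simp [PySem.Set.add, PySem.Set.contains, hmem]
        simp [List.foldl_cons, pvStepB, hc, PySem.Set.update, List.map_cons, ih, hadd]
      · have hc' : f.contains o.1 = false := by simpa using hc
        have hkeys : (f.insert o.1 o.2).keys = f.keys ++ [o.1] :=
          PySem.Dict.keys_insert_of_not_contains f o.2 hc'
        have hmem : o.1 ∉ f.keys := fun h => by
          simp [(PySem.Dict.contains_iff_mem_keys f o.1).mpr h] at hc'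
        have hadd : PySem.Set.add f.keys o.1 = f.keys ++ [o.1] := by
          simp [PySem.Set.add, PySem.Set.contains, hmem]
        simp [List.foldl_cons, pvStepB, hc', PySem.Set.update, List.map_cons, ih, hkeys, hadd]

theorem pvNodupB : ∀ (L : List (String × Int)) (f : PySem.Dict String Int),
    f.keys.Nodup → (L.foldl pvStepB f).keys.Nodup := by
  intro L
  induction L with
  | nil => intro f h; exact h
  | cons o L ih =>
      intro f h
      by_cases hc : f.contains o.1 = true
      · simpa [List.foldl_cons, pvStepB, hc] using ih f h
      · have hc' : f.contains o.1 = false := by simpa using hc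
        have := PySem.Dict.nodup_keys_insert f o.1 o.2 h
        simpa [List.foldl_cons, pvStepB, hc'] using ih _ this

theorem pvGetDB : ∀ (L : List (String × Int)) (f : PySem.Dict String Int) (c : String),
    (L.foldl pvStepB f).getD c 0
      = if f.contains c then f.getD c 0
        else ((L.find? (fun o => o.1 == c)).map (fun o => o.2)).getD 0 := by
  intro L
  induction L with
  | nil => intro f c; by_cases h : f.contains c = true <;> simp [PySem.Dict.getD_of_not_contains, *]
  | cons o L ih =>
      intro f c
      by_cases hc : f.contains o.1 = true
      · rw [List.foldl_cons, show pvStepB f o = f by simp [pvStepB, hc], ih]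
        by_cases hfc : f.contains c = true
        · simp [hfc]
        · have hne : (o.1 == c) = false := by
            by_cases h : o.1 = c
            · subst h; simp_all
            · simpa using h
          simp [hfc, hne]
      · have hc' : f.contains o.1 = false := by simpa using hc
        rw [List.foldl_cons, show pvStepB f o = f.insert o.1 o.2 by simp [pvStepB, hc'], ih]
        by_cases h : o.1 = c
        · subst h
          simp [PySem.Dict.getD_insert_self, hc']
        · have hne : (o.1 == c) = false := by simpa using h
          have hne' : c ≠ o.1 := fun hh => h hh.symm
          simp [PySem.Dict.contains_insert, hne,
            show (c == o.1) = false by simpa using hne',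
            PySem.Dict.getD_insert_of_ne f o.2 0 hne']

-- ---- Set.update plumbing ----
theorem pvMemUpdate {α : Type} [BEq α] [LawfulBEq α] :
    ∀ (t : List α) (s : PySem.Set α) (x : α),
      (x ∈ t ∨ x ∈ s) → x ∈ PySem.Set.update s t := by
  intro t
  induction t with
  | nil => intro s x h; simpa [PySem.Set.update] using h.resolve_left (by simp)
  | cons y t ih =>
      intro s x h
      have : x ∈ t ∨ x ∈ PySem.Set.add s y := by
        rcases h with h | h
        · rcases List.mem_cons.mp h with h | h
          · exact Or.inr ((PySem.Set.mem_add s y x).mpr (Or.inr h))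
          · exact Or.inl h
        · exact Or.inr ((PySem.Set.mem_add s y x).mpr (Or.inl h))
      simpa [PySem.Set.update, List.foldl_cons] using ih (PySem.Set.add s y) x this

theorem pvUpdAdd {α : Type} [BEq α] [LawfulBEq α] (t : List α) (s : PySem.Set α) (x : α) :
    PySem.Set.update s (PySem.Set.add t x) = PySem.Set.add (PySem.Set.update s t) x := by
  by_cases h : x ∈ t
  · have h1 : PySem.Set.add t x = t := by simp [PySem.Set.add, PySem.Set.contains, h]
    have h2 : x ∈ PySem.Set.update s t := pvMemUpdate t s x (Or.inl h)
    have h3 : PySem.Set.add (PySem.Set.update s t) x = PySem.Set.update s t := by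
      simp [PySem.Set.add, PySem.Set.contains, h2]
    rw [h1, h3]
  · have h1 : PySem.Set.add t x = t ++ [x] := by simp [PySem.Set.add, PySem.Set.contains, h]
    rw [h1]
    simp [PySem.Set.update, List.foldl_append]

theorem pvUpdUpd {α : Type} [BEq α] [LawfulBEq α] :
    ∀ (xs : List α) (t : List α) (s : PySem.Set α),
      PySem.Set.update s (PySem.Set.update t xs) = PySem.Set.update (PySem.Set.update s t) xs := by
  intro xs
  induction xs with
  | nil => intro t s; rfl
  | cons x xs ih =>
      intro t s
      have h1 : PySem.Set.update t (x :: xs) = PySem.Set.update (PySem.Set.add t x) xs := rfl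
      rw [h1, ih (PySem.Set.add t x) s, pvUpdAdd]
      rfl

theorem pvUpdOfList {α : Type} [BEq α] [LawfulBEq α] (xs : List α) (s : PySem.Set α) :
    PySem.Set.update s (PySem.Set.ofList xs) = PySem.Set.update s xs := by
  have h : PySem.Set.ofList xs = PySem.Set.update ([] : PySem.Set α) xs := rfl
  rw [h, pvUpdUpd xs [] s]
  rfl

theorem pvUpdFlat {β : Type} (g : β → List String) :
    ∀ (l : List β) (s : PySem.Set String),
      l.foldl (fun cs d => PySem.Set.update cs (g d)) s = PySem.Set.update s (l.flatMap g) := by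
  intro l
  induction l with
  | nil => intro s; rfl
  | cons d l ih =>
      intro s
      rw [List.foldl_cons, ih, List.flatMap_cons]
      simp [PySem.Set.update, List.foldl_append]

-- ---- emit fold characterization ----
theorem pvEmitGetD : ∀ (Δ : List (String × Int)) (cd : PySem.Dict String (List Int)) (c : String),
    (Δ.foldl pvStepE cd).getD c []
      = cd.getD c [] ++ (Δ.filter (fun p => p.1 == c)).map (fun p => p.2) := by
  intro Δ
  induction Δ with
  | nil => intro cd c; simp
  | cons p Δ ih =>
      intro cd c
      rw [List.foldl_cons, ih]
      by_cases h : p.1 = c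
      · subst h
        simp [pvStepE, PySem.Dict.getD_insert_self, List.filter_cons]
      · have hne : c ≠ p.1 := fun hh => h hh.symm
        simp [pvStepE, PySem.Dict.getD_insert_of_ne _ _ [] hne, List.filter_cons,
          show (p.1 == c) = false by simpa using h]

theorem pvEmitKeys (Δ : List (String × Int)) (cd : PySem.Dict String (List Int)) :
    (Δ.foldl pvStepE cd).keys = PySem.Set.update cd.keys (Δ.map (fun p => p.1)) :=
  PySem.Dict.keys_foldl_insert_key Δ (fun p => p.1) (fun d p => d.getD p.1 [] ++ [p.2]) cd

theorem pvEmitNodup (Δ : List (String × Int)) (cd : PySem.Dict String (List Int))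
    (h : cd.keys.Nodup) : (Δ.foldl pvStepE cd).keys.Nodup :=
  PySem.Dict.nodup_keys_foldl_insert_key Δ (fun p => p.1) (fun d p => d.getD p.1 [] ++ [p.2]) cd h

theorem pvFilterNodupSingle (c : String) :
    ∀ (keys : List String), keys.Nodup →
    keys.filter (fun k => k == c) = if c ∈ keys then [c] else [] := by
  intro keys
  induction keys with
  | nil => intro _; simp
  | cons k keys ih =>
      intro h
      rcases List.nodup_cons.mp h with ⟨hk, hnd⟩
      by_cases hkc : k = c
      · subst hkc
        simp [List.filter_cons, ih hnd, hk]
      · simp [List.filter_cons, show (k == c) = false by simpa using hkc, ih hnd,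
          show ¬ c = k by exact fun hh => hkc hh.symm]

-- ---- occurrence-stream facts ----
theorem pvOccKeysAux : ∀ (steps : List (Int × List Int × (List (String × Int)))) (s : Int),
    ((PySem.List.enumerate steps s).flatMap (fun p => p.2.2.2.map (fun q => (q.1, p.1)))).map (fun o => o.1)
      = steps.flatMap (fun d => d.2.2.map (fun q => q.1)) := by
  intro steps
  induction steps with
  | nil => intro s; rfl
  | cons d steps ih =>
      intro s
      simp only [PySem.List.enumerate_cons, List.flatMap_cons, List.map_append, ih, List.map_map]
      rfl

theorem pvMemOccKeys (steps : List (Int × List Int × (List (String × Int)))) (c : String) :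
    (c ∈ (pvOcc steps).map (fun o => o.1)) ↔ pvHas c steps = true := by
  rw [pvOcc, pvOccKeysAux steps 0]
  simp [pvHas, List.mem_flatMap, List.any_eq_true]

theorem pvFindHeadAux (c : String) :
    ∀ (E : List (Int × (Int × List Int × (List (String × Int))))),
    ((E.flatMap (fun p => p.2.2.2.map (fun q => (q.1, p.1)))).find? (fun o => o.1 == c)).map (fun o => o.2)
      = (E.filterMap (fun p => if p.2.2.2.any (fun q => q.1 == c) then some p.1 else none)).head? := by
  intro E
  induction E with
  | nil => rfl
  | cons p E ih =>
      simp only [List.flatMap_cons, List.filterMap_cons, List.find?_append]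
      by_cases h : p.2.2.2.any (fun q => q.1 == c) = true
      · obtain ⟨q, hq, hqc⟩ := List.any_eq_true.mp h
        have hfind : (p.2.2.2.map (fun q => (q.1, p.1))).find? (fun o => o.1 == c)
            = ((p.2.2.2.find? (fun q => q.1 == c)).map (fun q => (q.1, p.1))) := by
          rw [List.find?_map]; rfl
        have hsome : (p.2.2.2.find? (fun q => q.1 == c)).isSome := by
          rw [List.find?_isSome]; exact ⟨q, hq, hqc⟩
        obtain ⟨q', hq'⟩ := Option.isSome_iff_exists.mp hsome
        simp [h, hfind, hq']
      · have hnone : (p.2.2.2.find? (fun q => q.1 == c)) = none := by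
          rw [List.find?_eq_none]
          intro q hq hqc
          exact h (List.any_eq_true.mpr ⟨q, hq, hqc⟩)
        have hfind : (p.2.2.2.map (fun q => (q.1, p.1))).find? (fun o => o.1 == c) = none := by
          rw [List.find?_map, show (fun (o : String × Int) => o.1 == c) ∘ (fun (q : String × Int) => (q.1, p.1)) = fun q => q.1 == c from rfl, hnone]
          rfl
        rw [hfind]
        simpa [h] using ih

-- ---- min of the increasing matching-steps list is its head ----
theorem pvFoldlMinEq : ∀ (t : List Int) (x : Int), (∀ y ∈ t, x ≤ y) → t.foldl min x = x := by
  intro t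
  induction t with
  | nil => intro x _; rfl
  | cons y t ih =>
      intro x h
      have hxy : min x y = x := min_eq_left (h y (List.mem_cons_self))
      rw [List.foldl_cons, hxy]
      exact ih x (fun z hz => h z (List.mem_cons_of_mem _ hz))

theorem pvMinPairwise : ∀ (l : List Int), l.Pairwise (· ≤ ·) →
    PySem.List.min? l (fun x => x) = l.head? := by
  intro l h
  cases l with
  | nil => simp [PySem.List.min?_eq_none_iff]
  | cons x t =>
      rw [PySem.List.min?_id_cons,
        pvFoldlMinEq t x (fun y hy => (List.pairwise_cons.mp h).1 y hy)]
      rfl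

theorem pvMinHead (steps : List (Int × List Int × (List (String × Int)))) (c : String) :
    (PySem.List.min?
        ((PySem.List.enumerate steps).filterMap
          (fun p => if p.2.2.2.any (fun q => q.1 == c) then some p.1 else none))
        (fun x => x))
      = ((PySem.List.enumerate steps).filterMap
          (fun p => if p.2.2.2.any (fun q => q.1 == c) then some p.1 else none)).head? := by
  apply pvMinPairwise
  rw [List.pairwise_filterMap]
  apply (PySem.List.pairwise_lt_enumerate steps 0).imp
  intro a b hab x hx y hy
  have hx1 : x = a.1 := by by_cases h : (a.2.2.2.any fun q => q.1 == c) = true <;> simp [h] at hx <;> omega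
  have hy1 : y = b.1 := by by_cases h : (b.2.2.2.any fun q => q.1 == c) = true <;> simp [h] at hy <;> omega
  subst hx1; subst hy1; exact le_of_lt hab

-- ---- pvFirsts assembled ----
theorem pvFirstsKeys (steps : List (Int × List Int × (List (String × Int)))) :
    (pvFirsts steps).keys = PySem.Set.ofList ((pvOcc steps).map (fun o => o.1)) := by
  rw [pvFirsts, pvKeysB]; rfl

theorem pvFirstsNodup (steps : List (Int × List Int × (List (String × Int)))) :
    (pvFirsts steps).keys.Nodup :=
  pvNodupB (pvOcc steps) PySem.Dict.empty (by simp [PySem.Dict.keys_empty])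

theorem pvFirstsGetD (steps : List (Int × List Int × (List (String × Int)))) (c : String) :
    (pvFirsts steps).getD c 0 = pvFirstVal c steps := by
  rw [pvFirsts, pvGetDB]
  simp [PySem.Dict.contains_empty, pvFirstVal]

-- per-env: emitting (pvFirsts e).items onto cd
theorem pvEnvKeys (cd : PySem.Dict String (List Int))
    (steps : List (Int × List Int × (List (String × Int)))) :
    ((pvFirsts steps).items.foldl pvStepE cd).keys
      = PySem.Set.update cd.keys (steps.flatMap (fun d => d.2.2.map (fun q => q.1))) := by
  rw [pvEmitKeys]
  have h : (pvFirsts steps).items.map (fun p => p.1) = (pvFirsts steps).keys := rfl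
  rw [h, pvFirstsKeys, pvUpdOfList, pvOcc, pvOccKeysAux]

theorem pvEnvGetD (cd : PySem.Dict String (List Int))
    (steps : List (Int × List Int × (List (String × Int)))) (c : String) :
    ((pvFirsts steps).items.foldl pvStepE cd).getD c []
      = cd.getD c [] ++ (if pvHas c steps then [pvFirstVal c steps] else []) := by
  rw [pvEmitGetD]
  congr 1
  rw [PySem.Dict.items_eq_map_keys (pvFirsts steps) (pvFirstsNodup steps) 0,
    List.filter_map, List.map_map]
  have hcmp : ((fun (p : String × Int) => p.1 == c) ∘ fun k => (k, (pvFirsts steps).getD k 0))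
      = fun k => k == c := rfl
  rw [hcmp, pvFilterNodupSingle c (pvFirsts steps).keys (pvFirstsNodup steps)]
  by_cases h : pvHas c steps = true
  · have hmem : c ∈ (pvFirsts steps).keys := by
      rw [pvFirstsKeys, PySem.Set.mem_ofList]
      exact (pvMemOccKeys steps c).mpr h
    simp [hmem, h, pvFirstsGetD]
  · have hmem : c ∉ (pvFirsts steps).keys := by
      rw [pvFirstsKeys, PySem.Set.mem_ofList]
      intro hm
      exact h ((pvMemOccKeys steps c).mp hm)
    simp [hmem, show pvHas c steps = false by simpa using h]

-- global induction over the envs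
theorem pvAll : ∀ (E : List (Int × List (Int × List Int × (List (String × Int)))))
    (cd : PySem.Dict String (List Int)), cd.keys.Nodup →
    (E.foldl (fun cd env => (pvFirsts env.2).items.foldl pvStepE cd) cd).keys.Nodup ∧
    (E.foldl (fun cd env => (pvFirsts env.2).items.foldl pvStepE cd) cd).keys
      = PySem.Set.update cd.keys
          (E.flatMap (fun env => env.2.flatMap (fun d => d.2.2.map (fun q => q.1)))) ∧
    ∀ c, (E.foldl (fun cd env => (pvFirsts env.2).items.foldl pvStepE cd) cd).getD c []
      = cd.getD c [] ++ ((E.filter (fun env => pvHas c env.2)).map (fun env => pvFirstVal c env.2)) := by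
  intro E
  induction E with
  | nil => intro cd h; exact ⟨h, rfl, fun c => by simp⟩
  | cons env E ih =>
      intro cd h
      have hnd : ((pvFirsts env.2).items.foldl pvStepE cd).keys.Nodup := pvEmitNodup _ cd h
      obtain ⟨h1, h2, h3⟩ := ih ((pvFirsts env.2).items.foldl pvStepE cd) hnd
      refine ⟨by simpa using h1, ?_, ?_⟩
      · rw [List.foldl_cons, h2, pvEnvKeys, List.flatMap_cons]
        simp [PySem.Set.update, List.foldl_append]
      · intro c
        rw [List.foldl_cons, h3 c, pvEnvGetD, List.filter_cons]
        by_cases hc : pvHas c env.2 = true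
        · simp [hc]
        · simp [show pvHas c env.2 = false by simpa using hc]

-- ---- B-side normalization ----
theorem pvClasses (detections : List (Int × List (Int × List Int × (List (String × Int))))) :
    ((detections.map (fun e => e.2)).foldl
      (fun (cs : List String) steps =>
        steps.foldl (fun cs d =>
          d.2.2.foldl (fun (cs : List String) q =>
            if cs.contains q.1 then cs else cs ++ [q.1]) cs) cs) [])
    = PySem.Set.update []
        (detections.flatMap (fun env => env.2.flatMap (fun d => d.2.2.map (fun q => q.1)))) := by
  have hinner : ∀ (d : Int × List Int × (List (String × Int))) (cs : List String),
      d.2.2.foldl (fun (cs : List String) q =>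
        if cs.contains q.1 then cs else cs ++ [q.1]) cs
      = PySem.Set.update cs (d.2.2.map (fun q => q.1)) := by
    intro d cs
    rw [PySem.Set.update, List.foldl_map]
    rfl
  have hmid : ∀ (steps : List (Int × List Int × (List (String × Int)))) (cs : List String),
      steps.foldl (fun cs d =>
        d.2.2.foldl (fun (cs : List String) q =>
          if cs.contains q.1 then cs else cs ++ [q.1]) cs) cs
      = PySem.Set.update cs (steps.flatMap (fun d => d.2.2.map (fun q => q.1))) := by
    intro steps cs
    rw [← pvUpdFlat (fun d => d.2.2.map (fun q => q.1)) steps cs]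
    exact PySem.List.foldl_congr_mem _ _ _ _ (fun cs d _ => hinner d cs)
  rw [List.foldl_map]
  rw [show (fun (cs : List String) (e : Int × List (Int × List Int × (List (String × Int)))) =>
      e.2.foldl (fun cs d =>
        d.2.2.foldl (fun (cs : List String) q =>
          if cs.contains q.1 then cs else cs ++ [q.1]) cs) cs)
    = (fun cs e => PySem.Set.update cs (e.2.flatMap (fun d => d.2.2.map (fun q => q.1))))
    from funext fun cs => funext fun e => hmid e.2 cs]
  rw [pvUpdFlat (fun (env : Int × List (Int × List Int × (List (String × Int)))) =>
    env.2.flatMap (fun d => d.2.2.map (fun q => q.1))) detections []]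

-- B's min-expression is pvFirstVal
theorem pvMinVal (steps : List (Int × List Int × (List (String × Int)))) (c : String) :
    ((PySem.List.min?
        ((PySem.List.enumerate steps).filterMap
          (fun p => if p.2.2.2.any (fun q => q.1 == c) then some p.1 else none))
        (fun x => x)).getD 0)
      = pvFirstVal c steps := by
  rw [pvMinHead, pvFirstVal, pvOcc, pvFindHeadAux c]

-- ===== VERDICT (by name: the statement is the Claim_ definition above) =====
theorem process_detections_random_spec : Claim_equal_process_detections_random := by
  intro detections _
  unfold Spec_process_detections_random
  rw [process_detections_random, process_detections_random_alt]
  have hA : (detections.foldl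
      (fun (cd : PySem.Dict String (List Int)) env =>
        ((PySem.List.enumerate env.2).foldl
          (fun (st : PySem.Dict String (List Int) × PySem.Set String) p =>
            p.2.2.2.foldl
              (fun (st : PySem.Dict String (List Int) × PySem.Set String) q =>
                if PySem.Set.contains st.2 q.1 then st
                else (st.1.insert q.1 (st.1.getD q.1 [] ++ [p.1]), PySem.Set.add st.2 q.1))
              st)
          (cd, PySem.Set.empty)).1)
      PySem.Dict.empty)
      = detections.foldl (fun cd env => (pvFirsts env.2).items.foldl pvStepE cd) PySem.Dict.empty :=
    PySem.List.foldl_congr_mem _ _ _ _ (fun cd env _ => pvEnv cd env.2)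
  rw [hA]
  obtain ⟨hnd, hkeys, hgetD⟩ := pvAll detections PySem.Dict.empty (by simp [PySem.Dict.keys_empty])
  rw [PySem.Dict.items_eq_map_keys _ hnd []]
  rw [hkeys]
  rw [show PySem.Dict.empty.keys = ([] : List String) from rfl] at hkeys ⊢
  rw [← pvClasses detections]
  apply List.map_congr_left
  intro c _
  refine Prod.ext rfl ?_
  show (detections.foldl (fun cd env => (pvFirsts env.2).items.foldl pvStepE cd) PySem.Dict.empty).getD c [] = _
  rw [hgetD c]
  rw [show (PySem.Dict.empty (κ := String) (ν := List Int)).getD c [] = [] from rfl, List.nil_append]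
  rw [List.filter_map, List.map_map]
  apply List.map_congr_left
  intro env _
  exact (pvMinVal env.2 c).symm
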